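-- pv_equiv track=rewrite | github.com/swifttl/Advent_of_Code_2015 | Day5pt2.py | paircheck
-- ===== SOURCE A (Python) =====
-- def paircheck(line):
--     pairArray = []
--     for ch in range(len(line[:-1])):
--         posPair = line[ch]+line[ch+1]
--         if line.count(posPair) >= 2:
--             pairArray.append(posPair)
--     if len(pairArray) != 0:
--         return True
--     else:
--         return False
-- ===== SOURCE B (Python) =====
-- def paircheck(line):
--     first = {}
--     for i in range(len(line) - 1):
--         pair = line[i:i+2]
--         if pair in first:
--             if i - first[pair] >= 2:
--                 return True
--         else:
--             first[pair] = i
--     return False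
-- ===== Notes on version B (the rewrite author's own statement) =====
-- stated objective: faster
-- what changed: Replaced the quadratic scan that calls line.count on every adjacent pair and accumulates a list by a single pass keeping a dict of each pair's first index, returning True as soon as a pair recurs at distance >= 2.
import Mathlib
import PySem

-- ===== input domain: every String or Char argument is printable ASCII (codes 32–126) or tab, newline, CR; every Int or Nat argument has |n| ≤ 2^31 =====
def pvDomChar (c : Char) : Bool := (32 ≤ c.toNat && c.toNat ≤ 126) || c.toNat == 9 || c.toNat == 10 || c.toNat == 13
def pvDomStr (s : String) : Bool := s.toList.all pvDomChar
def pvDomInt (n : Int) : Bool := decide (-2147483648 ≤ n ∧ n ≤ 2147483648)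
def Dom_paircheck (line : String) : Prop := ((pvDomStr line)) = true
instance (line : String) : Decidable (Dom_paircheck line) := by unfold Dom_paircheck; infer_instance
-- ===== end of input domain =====

-- B replaces A's quadratic per-pair `line.count` scan by one pass with a dict of each pair's first index (O(n)).

-- ===== PORT A =====
-- String ops ported on toList; line[ch]/line[ch+1] via pyGetD: ch is drawn from range(len(line[:-1])),
-- so both indexes are always in range and the default is never used (A never raises).
def paircheck (line : String) : Bool :=
  let s := line.toList
  let pairArray : List (List Char) :=
    (PySem.List.pyRange 0 (PySem.Str.len (PySem.Str.slice line none (some (-1))))).foldl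
      (fun arr ch =>
        let posPair : List Char := [PySem.List.pyGetD s ch ' ', PySem.List.pyGetD s (ch + 1) ' ']
        if 2 ≤ PySem.Chars.count s posPair then arr ++ [posPair] else arr) []
  if pairArray.length ≠ 0 then true else false

-- ===== PORT B =====
-- the loop of Source B: i counts positions, l is the rest of the string, d is the dict pair -> first index
def altLoop (d : PySem.Dict (Char × Char) Int) (i : Nat) (l : List Char) : Bool :=
  match l with
  | a :: b :: rest =>
    match d.get? (a, b) with
    | some f => if 2 ≤ (i : Int) - f then true else altLoop d (i + 1) (b :: rest)
    | none => altLoop (d.insert (a, b) (i : Int)) (i + 1) (b :: rest)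
  | _ => false

def paircheck_alt (line : String) : Bool := altLoop PySem.Dict.empty 0 line.toList

-- ===== PRECONDITION & SPEC =====
def Spec_paircheck (line : String) (out : Bool) : Prop := out = paircheck_alt line
instance (line : String) (out : Bool) : Decidable (Spec_paircheck line out) := by unfold Spec_paircheck; infer_instance

-- ===== CLAIM (what is proved, stated in full; the proofs are below) =====
def Claim_equal_paircheck : Prop := ∀ (line : String), Dom_paircheck line → Spec_paircheck line (paircheck line)

-- ===== LEMMAS AND PROOFS =====

-- 'there is a pair of adjacent characters p at position k' (Bool, so Nat.find applies)
def patB (s : List Char) (k : Nat) (p : Char × Char) : Bool :=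
  (s[k]? == some p.1) && (s[k + 1]? == some p.2)

-- the common characterisation of both programs
def Good (s : List Char) : Prop :=
  ∃ j p, patB s j p = true ∧ ∃ k, k + 2 ≤ j ∧ patB s k p = true

theorem patB_iff (s : List Char) (k : Nat) (p : Char × Char) :
    patB s k p = true ↔ s[k]? = some p.1 ∧ s[k + 1]? = some p.2 := by
  simp [patB]

theorem patB_det (s : List Char) (k : Nat) (p q : Char × Char)
    (hp : patB s k p = true) (hq : patB s k q = true) : p = q := by
  rw [patB_iff] at hp hq
  obtain ⟨p1, p2⟩ := p; obtain ⟨q1, q2⟩ := q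
  simp_all

theorem pair_prefix_iff (s : List Char) (k : Nat) (a b : Char) :
    [a, b] <+: s.drop k ↔ patB s k (a, b) = true := by
  rw [patB_iff]
  have h0 : (s.drop k)[0]? = s[k]? := by
    simp [List.getElem?_drop]
  have h1 : (s.drop k)[1]? = s[k + 1]? := by
    simp [List.getElem?_drop]
  rw [← h0, ← h1]
  cases h : s.drop k with
  | nil => simp
  | cons x t =>
    cases t with
    | nil => simp [List.cons_prefix_iff]
    | cons y r => simp [List.cons_prefix_iff]

theorem go_acc (sub : List Char) :
    ∀ (fuel : Nat) (s : List Char) (acc : Nat),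
      PySem.Chars.count.go sub fuel s acc = acc + PySem.Chars.count.go sub fuel s 0 := by
  intro fuel
  induction fuel with
  | zero =>
    intro s acc
    rw [PySem.Chars.count.go.eq_def, PySem.Chars.count.go.eq_def]
    cases s <;> rfl
  | succ fuel ih =>
    intro s acc
    cases s with
    | nil => rfl
    | cons h t =>
      rw [PySem.Chars.count.go.eq_def]
      conv_rhs => rw [PySem.Chars.count.go.eq_def]
      by_cases hp : sub.isPrefixOf (h :: t) = true
      · simp only [hp, if_true]
        rw [ih _ (acc + 1), ih _ (0 + 1)]
        omega
      · simp only [hp, Bool.false_eq_true]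
        exact ih t acc

theorem go_one_iff (sub : List Char) (hsub : sub ≠ []) :
    ∀ (fuel : Nat) (s : List Char), s.length ≤ fuel →
      (1 ≤ PySem.Chars.count.go sub fuel s 0 ↔ ∃ i, sub <+: s.drop i) := by
  intro fuel
  induction fuel with
  | zero =>
    intro s hs
    have : s = [] := List.eq_nil_of_length_eq_zero (Nat.le_zero.mp hs)
    subst this
    rw [PySem.Chars.count.go.eq_def]
    simp [List.prefix_nil, hsub]
  | succ fuel ih =>
    intro s hs
    cases s with
    | nil =>
      rw [PySem.Chars.count.go.eq_def]
      simp [List.prefix_nil, hsub]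
    | cons h t =>
      rw [PySem.Chars.count.go.eq_def]
      simp only []
      by_cases hp : sub.isPrefixOf (h :: t) = true
      · simp only [hp, if_true]
        rw [go_acc]
        constructor
        · intro _; exact ⟨0, by simpa using List.isPrefixOf_iff_prefix.mp hp⟩
        · intro _; omega
      · simp only [hp, Bool.false_eq_true, if_false]
        have hlen : t.length ≤ fuel := by simp at hs; omega
        rw [ih t hlen]
        constructor
        · rintro ⟨i, hi⟩
          exact ⟨i + 1, by simpa [List.drop_succ_cons] using hi⟩
        · rintro ⟨i, hi⟩
          cases i with
          | zero =>
            exact absurd (List.isPrefixOf_iff_prefix.mpr (by simpa using hi)) (by simp [hp])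
          | succ i =>
            exact ⟨i, by simpa [List.drop_succ_cons] using hi⟩

theorem go_two_iff (sub : List Char) (hsub : sub ≠ []) :
    ∀ (fuel : Nat) (s : List Char), s.length ≤ fuel →
      (2 ≤ PySem.Chars.count.go sub fuel s 0 ↔
        ∃ i j, i + sub.length ≤ j ∧ sub <+: s.drop i ∧ sub <+: s.drop j) := by
  have hL : 1 ≤ sub.length := List.length_pos_iff.mpr hsub
  intro fuel
  induction fuel with
  | zero =>
    intro s hs
    have : s = [] := List.eq_nil_of_length_eq_zero (Nat.le_zero.mp hs)
    subst this
    rw [PySem.Chars.count.go.eq_def]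
    simp [List.prefix_nil, hsub]
  | succ fuel ih =>
    intro s hs
    cases s with
    | nil =>
      rw [PySem.Chars.count.go.eq_def]
      simp [List.prefix_nil, hsub]
    | cons h t =>
      rw [PySem.Chars.count.go.eq_def]
      simp only []
      by_cases hp : sub.isPrefixOf (h :: t) = true
      · simp only [hp, if_true]
        rw [go_acc]
        have hdlen : (List.drop sub.length (h :: t)).length ≤ fuel := by
          simp at hs ⊢; omega
        have h1 := go_one_iff sub hsub fuel (List.drop sub.length (h :: t)) hdlen
        constructor
        · intro hge
          obtain ⟨i, hi⟩ := h1.mp (by omega)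
          rw [List.drop_drop] at hi
          exact ⟨0, sub.length + i, by omega,
            by simpa using List.isPrefixOf_iff_prefix.mp hp, hi⟩
        · rintro ⟨i, j, hij, _, hj⟩
          have : 1 ≤ PySem.Chars.count.go sub fuel (List.drop sub.length (h :: t)) 0 := by
            apply h1.mpr
            refine ⟨j - sub.length, ?_⟩
            rw [List.drop_drop]
            have : sub.length + (j - sub.length) = j := by omega
            rw [this]; exact hj
          omega
      · simp only [hp, Bool.false_eq_true, if_false]
        have hlen : t.length ≤ fuel := by simp at hs; omega
        rw [ih t hlen]
        constructor
        · rintro ⟨i, j, hij, hi, hj⟩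
          exact ⟨i + 1, j + 1, by omega, by simpa [List.drop_succ_cons] using hi,
            by simpa [List.drop_succ_cons] using hj⟩
        · rintro ⟨i, j, hij, hi, hj⟩
          cases i with
          | zero =>
            exact absurd (List.isPrefixOf_iff_prefix.mpr (by simpa using hi)) (by simp [hp])
          | succ i =>
            cases j with
            | zero => omega
            | succ j =>
              exact ⟨i, j, by omega, by simpa [List.drop_succ_cons] using hi,
                by simpa [List.drop_succ_cons] using hj⟩

theorem count_two_iff (s sub : List Char) (hsub : sub ≠ []) :
    2 ≤ PySem.Chars.count s sub ↔
      ∃ i j, i + sub.length ≤ j ∧ sub <+: s.drop i ∧ sub <+: s.drop j := by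
  unfold PySem.Chars.count
  rw [if_neg (by simpa [List.isEmpty_iff] using hsub)]
  exact go_two_iff sub hsub s.length s le_rfl

theorem A_true_iff (line : String) : paircheck line = true ↔ Good line.toList := by
  have hlen : PySem.Str.len (PySem.Str.slice line none (some (-1))) =
      ((line.toList.length - 1 : Nat) : Int) := by
    rw [PySem.Str.len_eq, PySem.Str.slice_to_neg_one, List.length_dropLast]
  simp only [paircheck, hlen, PySem.List.pyRange_zero_natCast, List.foldl_map,
    ← Nat.cast_add_one, PySem.List.pyGetD_natCast]
  have happ := PySem.List.foldl_append_if
    (fun k : Nat => decide (2 ≤ PySem.Chars.count line.toList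
      [line.toList.getD k ' ', line.toList.getD (k + 1) ' ']))
    (fun k : Nat => [line.toList.getD k ' ', line.toList.getD (k + 1) ' '])
    (List.range (line.toList.length - 1)) []
  simp only [decide_eq_true_eq] at happ
  rw [happ]
  simp only [List.nil_append, List.length_map, ne_eq, List.length_eq_zero_iff,
    List.filter_eq_nil_iff, List.mem_range, decide_eq_true_eq, not_forall, not_not]
  constructor
  · intro hif
    have hex : ∃ k, k < line.toList.length - 1 ∧
        2 ≤ PySem.Chars.count line.toList
          [line.toList.getD k ' ', line.toList.getD (k + 1) ' '] := by
      by_contra hno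
      rw [if_neg] at hif
      · exact Bool.false_ne_true hif
      · intro hc
        apply hno
        simpa [exists_prop] using hc
    obtain ⟨k, hk, hcount⟩ := hex
    obtain ⟨i, j, hij, hi, hj⟩ := (count_two_iff line.toList _ (by simp)).mp hcount
    simp only [List.length_cons, List.length_nil] at hij
    rw [pair_prefix_iff] at hi hj
    exact ⟨j, _, hj, i, by omega, hi⟩
  · rintro ⟨j, p, hpj, k, hkj, hpk⟩
    rw [if_pos]
    rw [patB_iff] at hpk
    have hk1 : k + 1 < line.toList.length := by
      have := hpk.2
      exact (List.getElem?_eq_some_iff.mp this).1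
    have hgk : line.toList.getD k ' ' = p.1 := by
      simp [List.getD_eq_getElem?_getD, hpk.1]
    have hgk1 : line.toList.getD (k + 1) ' ' = p.2 := by
      simp [List.getD_eq_getElem?_getD, hpk.2]
    refine ⟨k, by omega, ?_⟩
    rw [hgk, hgk1]
    apply (count_two_iff line.toList [p.1, p.2] (by simp)).mpr
    refine ⟨k, j, by simp; omega, ?_, ?_⟩
    · rw [pair_prefix_iff]
      rw [patB_iff]
      exact hpk
    · rw [pair_prefix_iff]
      exact hpj

-- invariant of the dict in B's loop: it maps a pair to the index of its FIRST occurrence before i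
def DInv (s : List Char) (d : PySem.Dict (Char × Char) Int) (i : Nat) : Prop :=
  ∀ p f, d.get? p = some f ↔
    ∃ k : Nat, f = (k : Int) ∧ k < i ∧ patB s k p = true ∧ ∀ m, patB s m p = true → k ≤ m

theorem no_earlier (s : List Char) (d : PySem.Dict (Char × Char) Int) (i : Nat)
    (p : Char × Char) (hinv : DInv s d i) (hnone : d.get? p = none) :
    ∀ m, m < i → patB s m p = true → False := by
  intro m hmi hm
  have hex : ∃ k, patB s k p = true := ⟨m, hm⟩
  have hspec := Nat.find_spec hex
  have hle : Nat.find hex ≤ m := Nat.find_min' hex hm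
  have := (hinv p ((Nat.find hex : Nat) : Int)).mpr
    ⟨Nat.find hex, rfl, by omega, hspec, fun m' hm' => Nat.find_min' hex hm'⟩
  rw [hnone] at this
  cases this

theorem altLoop_iff (s : List Char) :
    ∀ (l : List Char) (i : Nat) (d : PySem.Dict (Char × Char) Int),
      l = s.drop i → DInv s d i →
      (altLoop d i l = true ↔
        ∃ j p, i ≤ j ∧ patB s j p = true ∧ ∃ k, k + 2 ≤ j ∧ patB s k p = true) := by
  intro l
  induction l with
  | nil =>
    intro i d hdrop hinv
    simp only [altLoop]
    constructor
    · intro h; cases h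
    · rintro ⟨j, p, hij, hpj, -⟩
      exfalso
      rw [patB_iff] at hpj
      have hj1 : j + 1 < s.length := (List.getElem?_eq_some_iff.mp hpj.2).1
      have := congrArg List.length hdrop
      simp [List.length_drop] at this
      omega
  | cons a t ih =>
    cases t with
    | nil =>
      intro i d hdrop hinv
      simp only [altLoop]
      constructor
      · intro h; cases h
      · rintro ⟨j, p, hij, hpj, -⟩
        exfalso
        rw [patB_iff] at hpj
        have hj1 : j + 1 < s.length := (List.getElem?_eq_some_iff.mp hpj.2).1
        have := congrArg List.length hdrop
        simp [List.length_drop] at this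
        omega
    | cons b rest =>
      intro i d hdrop hinv
      have h0 : s[i]? = some a := by
        have := List.getElem?_drop (xs := s) (i := i) (j := 0)
        rw [← hdrop] at this
        simpa using this.symm
      have h1 : s[i + 1]? = some b := by
        have := List.getElem?_drop (xs := s) (i := i) (j := 1)
        rw [← hdrop] at this
        simpa using this.symm
      have hi_pat : patB s i (a, b) = true := by
        rw [patB_iff]; exact ⟨h0, h1⟩
      have hdrop1 : b :: rest = s.drop (i + 1) := by
        have := List.drop_drop (l := s) (i := 1) (j := i)
        rw [← hdrop] at this
        simpa using this
      simp only [altLoop]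
      cases hget : d.get? (a, b) with
      | some f =>
        simp only []
        obtain ⟨k0, hf, hk0, hp0, hmin⟩ := (hinv (a, b) f).mp hget
        by_cases hc : 2 ≤ (i : Int) - f
        · rw [if_pos hc]
          constructor
          · intro _
            exact ⟨i, (a, b), le_rfl, hi_pat, k0, by omega, hp0⟩
          · intro _; rfl
        · rw [if_neg hc]
          have hinv' : DInv s d (i + 1) := by
            intro p f'
            rw [hinv p f']
            constructor
            · rintro ⟨k, hfk, hk, hpk, hm⟩
              exact ⟨k, hfk, by omega, hpk, hm⟩
            · rintro ⟨k, hfk, hk, hpk, hm⟩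
              refine ⟨k, hfk, ?_, hpk, hm⟩
              rcases Nat.lt_succ_iff_lt_or_eq.mp hk with h | h
              · exact h
              · exfalso
                subst h
                have hpe : p = (a, b) := patB_det s k p (a, b) hpk hi_pat
                subst hpe
                have := hm k0 hp0
                omega
          rw [ih (i + 1) d hdrop1 hinv']
          constructor
          · rintro ⟨j, p, hij, hpj, k, hkj, hpk⟩
            exact ⟨j, p, by omega, hpj, k, hkj, hpk⟩
          · rintro ⟨j, p, hij, hpj, k, hkj, hpk⟩
            rcases Nat.lt_or_ge j (i + 1) with h | h
            · exfalso
              have hji : j = i := by omega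
              subst hji
              have hpe : p = (a, b) := patB_det s j p (a, b) hpj hi_pat
              subst hpe
              have := hmin k hpk
              omega
            · exact ⟨j, p, h, hpj, k, hkj, hpk⟩
      | none =>
        simp only []
        have hinv' : DInv s (d.insert (a, b) (i : Int)) (i + 1) := by
          intro p f'
          by_cases hpab : p = (a, b)
          · subst hpab
            rw [PySem.Dict.get?_insert_self]
            constructor
            · intro hsome
              have hfi : f' = (i : Int) := by injection hsome with h; exact h.symm
              refine ⟨i, hfi, by omega, hi_pat, ?_⟩
              intro m hm
              by_contra hmi
              exact no_earlier s d i (a, b) hinv hget m (by omega) hm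
            · rintro ⟨k, hfk, hk, hpk, hm⟩
              have hki : k = i := by
                rcases Nat.lt_succ_iff_lt_or_eq.mp hk with h | h
                · exact absurd hpk (by
                    intro hc
                    exact no_earlier s d i (a, b) hinv hget k h hc)
                · exact h
              subst hki
              rw [hfk]
          · rw [PySem.Dict.get?_insert_of_ne d _ hpab]
            rw [hinv p f']
            constructor
            · rintro ⟨k, hfk, hk, hpk, hm⟩
              exact ⟨k, hfk, by omega, hpk, hm⟩
            · rintro ⟨k, hfk, hk, hpk, hm⟩
              refine ⟨k, hfk, ?_, hpk, hm⟩
              rcases Nat.lt_succ_iff_lt_or_eq.mp hk with h | h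
              · exact h
              · exfalso
                subst h
                exact hpab (patB_det s k p (a, b) hpk hi_pat)
        rw [ih (i + 1) _ hdrop1 hinv']
        constructor
        · rintro ⟨j, p, hij, hpj, k, hkj, hpk⟩
          exact ⟨j, p, by omega, hpj, k, hkj, hpk⟩
        · rintro ⟨j, p, hij, hpj, k, hkj, hpk⟩
          rcases Nat.lt_or_ge j (i + 1) with h | h
          · exfalso
            have hji : j = i := by omega
            rw [hji] at hpj
            have hpe : p = (a, b) := patB_det s i p (a, b) hpj hi_pat
            subst hpe
            exact no_earlier s d i (a, b) hinv hget k (by omega) hpk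
          · exact ⟨j, p, h, hpj, k, hkj, hpk⟩

theorem B_true_iff (line : String) : paircheck_alt line = true ↔ Good line.toList := by
  unfold paircheck_alt
  rw [altLoop_iff line.toList line.toList 0 PySem.Dict.empty (by simp)
    (by intro p f; simp [PySem.Dict.get?_empty])]
  unfold Good
  constructor
  · rintro ⟨j, p, -, hpj, k, hkj, hpk⟩
    exact ⟨j, p, hpj, k, hkj, hpk⟩
  · rintro ⟨j, p, hpj, k, hkj, hpk⟩
    exact ⟨j, p, Nat.zero_le j, hpj, k, hkj, hpk⟩

-- ===== VERDICT (by name: the statement is the Claim_ definition above) =====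
theorem paircheck_spec : Claim_equal_paircheck := by
  intro line _
  unfold Spec_paircheck
  rw [Bool.eq_iff_iff, A_true_iff, B_true_iff]
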